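-- pv_equiv track=rewrite | github.com/gabrieldelisle/Advent-of-Code | src/2023/day24.py | next_table
-- ===== SOURCE A (Python) =====
-- directions = {
--     "<": (0, -1),
--     "^": (-1, 0),
--     "wait": (0, 0),
--     ">": (0, 1),
--     "v": (1, 0),
-- }
--
-- def next_table(table):
--     n, m = len(table), len(table[0])
--     return [
--         [
--             [
--                 direction
--                 for direction, (u, v) in directions.items()
--                 if (direction in table[(i - u) % n][(j - v) % m])
--             ]
--             for j in range(m)
--         ]
--         for i in range(n)
--     ]
-- ===== SOURCE B (Python) =====
-- directions = {
--     "<": (0, -1),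
--     "^": (-1, 0),
--     "wait": (0, 0),
--     ">": (0, 1),
--     "v": (1, 0),
-- }
--
--
-- def next_table(table):
--     # Scatter instead of gather: start from a grid of empty lists and push each
--     # direction from its source cell to the target cell (i+u, j+v) modulo the
--     # grid size. Keeping the direction loop outermost preserves the per-cell
--     # order of the original dict iteration.
--     n, m = len(table), len(table[0])
--     result = [[[] for _ in range(m)] for _ in range(n)]
--     for direction, (u, v) in directions.items():
--         for i in range(n):
--             for j in range(m):
--                 if direction in table[i][j]:
--                     result[(i + u) % n][(j + v) % m].append(direction)
--     return result
-- ===== Notes on version B (the rewrite author's own statement) =====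
-- stated objective: alternative
-- what changed: Gather (each output cell scans all five modular source cells) is replaced by scatter: the result starts as a grid of empty lists and each direction present in a source cell is pushed to its modular target cell, with the direction loop outermost so per-cell order is preserved.
import Mathlib
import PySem

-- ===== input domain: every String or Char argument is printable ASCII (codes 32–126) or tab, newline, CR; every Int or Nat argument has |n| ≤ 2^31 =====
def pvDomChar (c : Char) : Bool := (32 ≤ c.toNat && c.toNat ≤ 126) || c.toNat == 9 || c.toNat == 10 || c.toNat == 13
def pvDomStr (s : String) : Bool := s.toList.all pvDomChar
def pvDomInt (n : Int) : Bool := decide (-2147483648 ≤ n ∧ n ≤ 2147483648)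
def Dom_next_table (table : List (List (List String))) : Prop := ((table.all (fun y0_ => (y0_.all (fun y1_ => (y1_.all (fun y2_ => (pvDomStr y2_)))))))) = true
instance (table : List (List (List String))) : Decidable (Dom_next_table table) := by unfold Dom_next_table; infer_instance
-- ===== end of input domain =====

-- B replaces A's per-cell gather over the five modular source cells by a scatter pass that
-- pushes each direction from its source cell to the modular target cell (objective: alternative).

-- the module-level `directions` dict, in its insertion order
def pvDirs : List (String × Int × Int) :=
  [("<", 0, -1), ("^", -1, 0), ("wait", 0, 0), (">", 0, 1), ("v", 1, 0)]

-- ===== PORT A =====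
def next_table (table : List (List (List String))) : List (List (List String)) :=
  let n : Int := table.length
  let m : Int := ((PySem.List.pyGet? table 0).getD []).length
  (PySem.List.pyRange 0 n 1).map fun i =>
    (PySem.List.pyRange 0 m 1).map fun j =>
      pvDirs.filterMap fun duv =>
        if duv.1 ∈ (PySem.List.pyGet?
            ((PySem.List.pyGet? table (PySem.Int.mod (i - duv.2.1) n)).getD [])
            (PySem.Int.mod (j - duv.2.2) m)).getD []
        then some duv.1 else none

-- ===== PORT B =====
-- result[(i+u)%n][(j+v)%m].append(direction)
def pvModifyCell (g : List (List (List String))) (i j : Nat) (d : String) :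
    List (List (List String)) :=
  g.modify i (fun row => row.modify j (fun c => c ++ [d]))

-- body of the innermost `if`
def pvStep (table : List (List (List String))) (n m : Int) (duv : String × Int × Int)
    (res : List (List (List String))) (i j : Int) : List (List (List String)) :=
  if duv.1 ∈ (PySem.List.pyGet? ((PySem.List.pyGet? table i).getD []) j).getD []
  then pvModifyCell res (PySem.Int.mod (i + duv.2.1) n).toNat
        (PySem.Int.mod (j + duv.2.2) m).toNat duv.1
  else res

-- `for j in range(m): ...`
def pvLoopJ (table : List (List (List String))) (n m : Int) (duv : String × Int × Int)
    (res : List (List (List String))) (i : Int) : List (List (List String)) :=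
  (PySem.List.pyRange 0 m 1).foldl (fun r j => pvStep table n m duv r i j) res

-- `for i in range(n): ...`
def pvLoopI (table : List (List (List String))) (n m : Int) (duv : String × Int × Int)
    (res : List (List (List String))) : List (List (List String)) :=
  (PySem.List.pyRange 0 n 1).foldl (fun r i => pvLoopJ table n m duv r i) res

def next_table_alt (table : List (List (List String))) : List (List (List String)) :=
  let n : Int := table.length
  let m : Int := ((PySem.List.pyGet? table 0).getD []).length
  let init := (PySem.List.pyRange 0 n 1).map fun _ =>
    (PySem.List.pyRange 0 m 1).map fun _ => ([] : List String)
  pvDirs.foldl (fun res duv => pvLoopI table n m duv res) init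

-- ===== PRECONDITION & SPEC =====
-- Pre_ excludes exactly the inputs on which the Python A raises IndexError: the empty table
-- (len(table[0]) fails) and tables with a row shorter than the width m = len(table[0])
-- (every row is indexed at every column 0..m-1).
def Pre_next_table (table : List (List (List String))) : Prop :=
  table ≠ [] ∧ ∀ row ∈ table, (table.headD []).length ≤ row.length
instance (table : List (List (List String))) : Decidable (Pre_next_table table) := by
  unfold Pre_next_table; infer_instance

def pvWitness_next_table : List (List (List String)) := [[["<"], []], [["v", ">"], ["wait"]]]

def Spec_next_table (table : List (List (List String))) (out : List (List (List String))) : Prop := out = next_table_alt table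
instance (table : List (List (List String))) (out : List (List (List String))) : Decidable (Spec_next_table table out) := by unfold Spec_next_table; infer_instance

-- ===== CLAIM (what is proved, stated in full; the proofs are below) =====
def Claim_equal_next_table : Prop := ∀ (table : List (List (List String))), Dom_next_table table → Pre_next_table table → Spec_next_table table (next_table table)

-- ===== LEMMAS AND PROOFS =====

-- the contents of cell table[i][j] (Int indices), with [] for an out-of-range index
def pvCellAt (table : List (List (List String))) (i j : Int) : List String :=
  (PySem.List.pyGet? ((PySem.List.pyGet? table i).getD []) j).getD []

def pvGet2 (g : List (List (List String))) (i j : Nat) : List String :=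
  (g.getD i []).getD j []

def pvShape (n m : Nat) (g : List (List (List String))) : Prop :=
  g.length = n ∧ ∀ i : Nat, i < n → (g.getD i []).length = m

lemma pvMod_bounds (a M : Int) (hM : 0 < M) :
    0 ≤ PySem.Int.mod a M ∧ PySem.Int.mod a M < M := by
  rw [PySem.Int.mod_eq_emod_of_pos hM]
  exact ⟨Int.emod_nonneg a (by omega), Int.emod_lt_of_pos a hM⟩

-- the source index hitting target t under shift u is unique in [0, M)
lemma pvModInv (M t u j : Int) (hM : 0 < M) (ht0 : 0 ≤ t) (ht : t < M)
    (hj0 : 0 ≤ j) (hj : j < M) :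
    PySem.Int.mod (j + u) M = t ↔ j = PySem.Int.mod (t - u) M := by
  rw [PySem.Int.mod_eq_emod_of_pos hM, PySem.Int.mod_eq_emod_of_pos hM]
  constructor
  · intro h
    have hd : (j + u) % M = (j + u) - M * ((j + u) / M) := Int.emod_def _ _
    have h2 : t - u = j + M * (-((j + u) / M)) := by rw [← h, hd]; ring
    rw [h2, Int.add_mul_emod_self_left, Int.emod_eq_of_lt hj0 hj]
  · intro h
    have hd : (t - u) % M = (t - u) - M * ((t - u) / M) := Int.emod_def _ _
    have h2 : j + u = t + M * (-((t - u) / M)) := by rw [h, hd]; ring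
    rw [h2, Int.add_mul_emod_self_left, Int.emod_eq_of_lt ht0 ht]

lemma pvShape_modifyCell {n m : Nat} {g : List (List (List String))}
    (h : pvShape n m g) (a b : Nat) (d : String) : pvShape n m (pvModifyCell g a b d) := by
  obtain ⟨h1, h2⟩ := h
  refine ⟨by simpa [pvModifyCell] using h1, fun i hi => ?_⟩
  have := h2 i hi
  simp only [pvModifyCell, List.getD, List.getElem?_modify] at *
  cases hg : g[i]? with
  | none => simp [hg] at this ⊢; omega
  | some row => by_cases hai : a = i <;> simp [hg, hai] at this ⊢ <;> simpa using this

lemma pvGet2_modifyCell {n m : Nat} {g : List (List (List String))}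
    (h : pvShape n m g) {a b i j : Nat} (ha : a < n) (hb : b < m)
    (hi : i < n) (hj : j < m) (d : String) :
    pvGet2 (pvModifyCell g a b d) i j =
      if a = i ∧ b = j then pvGet2 g i j ++ [d] else pvGet2 g i j := by
  obtain ⟨h1, h2⟩ := h
  have hgi : i < g.length := by omega
  have hrow : (g.getD i []).length = m := h2 i hi
  simp only [pvGet2, pvModifyCell, List.getD, List.getElem?_modify]
  cases hg : g[i]? with
  | none => simp [List.getElem?_eq_none_iff] at hg; omega
  | some row =>
    have hrowlen : row.length = m := by simp [List.getD, hg] at hrow; exact hrow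
    by_cases hai : a = i
    · subst hai
      simp only [if_pos rfl, Option.map_some]
      simp only [Option.getD_some, List.getD, List.getElem?_modify]
      cases hr : row[j]? with
      | none => simp [List.getElem?_eq_none_iff] at hr; omega
      | some c =>
        by_cases hbj : b = j
        · subst hbj; simp [hr]
        · simp [hr, hbj]
    · simp [hai]

-- one fold pass whose every step appends a fixed chunk to the observed cell and keeps the shape
lemma pvFoldl_effect {α : Type} (xs : List α)
    (step : List (List (List String)) → α → List (List (List String)))
    (e : α → List String) (n m ti tj : Nat)
    (hstep : ∀ g x, x ∈ xs → pvShape n m g →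
      pvShape n m (step g x) ∧ pvGet2 (step g x) ti tj = pvGet2 g ti tj ++ e x) :
    ∀ g, pvShape n m g →
      pvShape n m (xs.foldl step g) ∧
      pvGet2 (xs.foldl step g) ti tj = pvGet2 g ti tj ++ xs.flatMap e := by
  induction xs with
  | nil => intro g hg; simpa using hg
  | cons x xs ih =>
    intro g hg
    obtain ⟨hs, he⟩ := hstep g x (List.mem_cons_self) hg
    obtain ⟨hs', he'⟩ := ih (fun g' y hy => hstep g' y (List.mem_cons_of_mem x hy)) (step g x) hs
    refine ⟨by simpa using hs', ?_⟩
    simp only [List.foldl_cons] at *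
    rw [he', he, List.flatMap_cons, List.append_assoc]

-- flatMap of a function vanishing away from one element of a Nodup list
lemma pvFlatMap_single {α : Type} [DecidableEq α] (l : List α) (f : α → List String) (a : α)
    (hmem : a ∈ l) (hnd : l.Nodup) (hz : ∀ x ∈ l, x ≠ a → f x = []) :
    l.flatMap f = f a := by
  induction l with
  | nil => cases hmem
  | cons y l ih =>
    rcases List.mem_cons.mp hmem with h | h
    · subst h
      have : l.flatMap f = [] := by
        apply List.flatMap_eq_nil_iff.mpr
        intro x hx
        exact hz x (List.mem_cons_of_mem _ hx) (fun hxa => (List.nodup_cons.mp hnd).1 (hxa ▸ hx))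
      simp [this]
    · have hy : f y = [] := hz y List.mem_cons_self (fun hya => (List.nodup_cons.mp hnd).1 (hya ▸ h))
      simp [hy, ih h (List.nodup_cons.mp hnd).2 (fun x hx => hz x (List.mem_cons_of_mem _ hx))]

-- effect of the inner j-loop on one observed cell
lemma pvLoopJ_effect (table : List (List (List String))) (n m : Nat) (duv : String × Int × Int)
    (hn : 0 < n) (hm : 0 < m) (i : Int) (ti tj : Nat) (hti : ti < n) (htj : tj < m) :
    ∀ g, pvShape n m g →
      pvShape n m (pvLoopJ table n m duv g i) ∧
      pvGet2 (pvLoopJ table n m duv g i) ti tj = pvGet2 g ti tj ++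
        (if (PySem.Int.mod (i + duv.2.1) n).toNat = ti ∧
            duv.1 ∈ pvCellAt table i (PySem.Int.mod ((tj : Int) - duv.2.2) m)
         then [duv.1] else []) := by
  intro g hg
  have hM : (0:Int) < (m:Int) := by exact_mod_cast hm
  have key := pvFoldl_effect (PySem.List.pyRange 0 (m:Int) 1)
      (fun r j => pvStep table n m duv r i j)
      (fun j => if (PySem.Int.mod (i + duv.2.1) n).toNat = ti ∧
          (PySem.Int.mod (j + duv.2.2) m).toNat = tj ∧ duv.1 ∈ pvCellAt table i j
        then [duv.1] else []) n m ti tj ?_ g hg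
  · obtain ⟨hsh, hget⟩ := key
    refine ⟨hsh, ?_⟩
    rw [pvLoopJ, hget]
    congr 1
    by_cases hA : (PySem.Int.mod (i + duv.2.1) n).toNat = ti
    · set j0 : Int := PySem.Int.mod ((tj : Int) - duv.2.2) m with hj0
      have hb := pvMod_bounds ((tj : Int) - duv.2.2) m hM
      have hBj0 : (PySem.Int.mod (j0 + duv.2.2) m).toNat = tj := by
        have := (pvModInv (m:Int) (tj:Int) duv.2.2 j0 hM (by positivity) (by exact_mod_cast htj)
          hb.1 hb.2).mpr rfl
        have hb2 := pvMod_bounds (j0 + duv.2.2) m hM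
        omega
      rw [pvFlatMap_single _ _ j0 ?_ (PySem.List.nodup_pyRange_one 0 (m:Int)) ?_]
      · simp only [hA, hBj0, true_and]
      · exact (PySem.List.mem_pyRange_one).mpr ⟨hb.1, hb.2⟩
      · intro x hx hne
        rcases (PySem.List.mem_pyRange_one).mp hx with ⟨hx0, hx1⟩
        have hbx := pvMod_bounds (x + duv.2.2) m hM
        have : ¬ (PySem.Int.mod (x + duv.2.2) m).toNat = tj := by
          intro hEq
          exact hne ((pvModInv (m:Int) (tj:Int) duv.2.2 x hM (by positivity)
            (by exact_mod_cast htj) hx0 hx1).mp (by omega))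
        simp [this]
    · rw [if_neg (fun h => hA h.1)]
      apply List.flatMap_eq_nil_iff.mpr
      intro x hx
      simp [hA]
  · intro g' j hj hg'
    simp only [pvStep]
    by_cases hc : duv.1 ∈ (PySem.List.pyGet? ((PySem.List.pyGet? table i).getD []) j).getD []
    · rw [if_pos hc]
      have hbn := pvMod_bounds (i + duv.2.1) n (by exact_mod_cast hn)
      have hbm := pvMod_bounds (j + duv.2.2) m hM
      have ha : (PySem.Int.mod (i + duv.2.1) n).toNat < n := by omega
      have hb : (PySem.Int.mod (j + duv.2.2) m).toNat < m := by omega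
      refine ⟨pvShape_modifyCell hg' _ _ _, ?_⟩
      rw [pvGet2_modifyCell hg' ha hb hti htj]
      have hcc : duv.1 ∈ pvCellAt table i j := hc
      split_ifs with h1 h2 h2 <;> simp_all
    · rw [if_neg hc]
      have hcc : duv.1 ∉ pvCellAt table i j := hc
      refine ⟨hg', ?_⟩
      rw [if_neg (fun h => hcc h.2.2)]
      simp

-- effect of the double loop for one direction on one observed cell
lemma pvLoopI_effect (table : List (List (List String))) (n m : Nat) (duv : String × Int × Int)
    (hn : 0 < n) (hm : 0 < m) (ti tj : Nat) (hti : ti < n) (htj : tj < m) :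
    ∀ g, pvShape n m g →
      pvShape n m (pvLoopI table n m duv g) ∧
      pvGet2 (pvLoopI table n m duv g) ti tj = pvGet2 g ti tj ++
        (if duv.1 ∈ pvCellAt table (PySem.Int.mod ((ti : Int) - duv.2.1) n)
            (PySem.Int.mod ((tj : Int) - duv.2.2) m)
         then [duv.1] else []) := by
  intro g hg
  have hN : (0:Int) < (n:Int) := by exact_mod_cast hn
  have key := pvFoldl_effect (PySem.List.pyRange 0 (n:Int) 1)
      (fun r i => pvLoopJ table n m duv r i)
      (fun i => if (PySem.Int.mod (i + duv.2.1) n).toNat = ti ∧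
          duv.1 ∈ pvCellAt table i (PySem.Int.mod ((tj : Int) - duv.2.2) m)
        then [duv.1] else []) n m ti tj ?_ g hg
  · obtain ⟨hsh, hget⟩ := key
    refine ⟨hsh, ?_⟩
    rw [pvLoopI, hget]
    congr 1
    set i0 : Int := PySem.Int.mod ((ti : Int) - duv.2.1) n with hi0
    have hb := pvMod_bounds ((ti : Int) - duv.2.1) n hN
    have hBi0 : (PySem.Int.mod (i0 + duv.2.1) n).toNat = ti := by
      have := (pvModInv (n:Int) (ti:Int) duv.2.1 i0 hN (by positivity) (by exact_mod_cast hti)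
        hb.1 hb.2).mpr rfl
      have hb2 := pvMod_bounds (i0 + duv.2.1) n hN
      omega
    rw [pvFlatMap_single _ _ i0 ((PySem.List.mem_pyRange_one).mpr ⟨hb.1, hb.2⟩)
      (PySem.List.nodup_pyRange_one 0 (n:Int)) ?_]
    · simp [hBi0]
    · intro x hx hne
      rcases (PySem.List.mem_pyRange_one).mp hx with ⟨hx0, hx1⟩
      have hbx := pvMod_bounds (x + duv.2.1) n hN
      have : ¬ (PySem.Int.mod (x + duv.2.1) n).toNat = ti := by
        intro hEq
        exact hne ((pvModInv (n:Int) (ti:Int) duv.2.1 x hN (by positivity)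
          (by exact_mod_cast hti) hx0 hx1).mp (by omega))
      simp [this]
  · intro g' i hi hg'
    simpa using pvLoopJ_effect table n m duv hn hm i ti tj hti htj g' hg'

-- shape preservation alone (needed also when m = 0, where no observed cell exists)
lemma pvFoldl_shape {α : Type} (xs : List α)
    (step : List (List (List String)) → α → List (List (List String))) (n m : Nat)
    (hstep : ∀ g x, pvShape n m g → pvShape n m (step g x)) :
    ∀ g, pvShape n m g → pvShape n m (xs.foldl step g) := by
  induction xs with
  | nil => intro g hg; simpa using hg
  | cons x xs ih => intro g hg; exact ih (step g x) (hstep g x hg)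

lemma pvStep_shape {n m : Nat} (table : List (List (List String))) (n' m' : Int)
    (duv : String × Int × Int) (i j : Int) {g : List (List (List String))}
    (hg : pvShape n m g) : pvShape n m (pvStep table n' m' duv g i j) := by
  rw [pvStep]
  split
  · exact pvShape_modifyCell hg _ _ _
  · exact hg

lemma pvLoopI_shape {n m : Nat} (table : List (List (List String))) (n' m' : Int)
    (duv : String × Int × Int) {g : List (List (List String))} (hg : pvShape n m g) :
    pvShape n m (pvLoopI table n' m' duv g) := by
  rw [pvLoopI]
  refine pvFoldl_shape _ _ n m (fun g' i hg' => ?_) g hg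
  rw [pvLoopJ]
  exact pvFoldl_shape _ _ n m (fun g'' j hg'' => pvStep_shape table n' m' duv i j hg'') g' hg'

lemma pvFilterMap_eq_flatMap (l : List (String × Int × Int))
    (p : (String × Int × Int) → Prop) [DecidablePred p] :
    l.filterMap (fun x => if p x then some x.1 else none) =
      l.flatMap (fun x => if p x then [x.1] else []) := by
  induction l with
  | nil => simp
  | cons x l ih =>
    by_cases hp : p x <;> simp [List.filterMap_cons, hp, ih]

theorem next_table_spec : Claim_equal_next_table := by
  unfold Claim_equal_next_table
  intro table _ hpre
  obtain ⟨hne, hrows⟩ := hpre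
  unfold Spec_next_table
  have hm0 : (PySem.List.pyGet? table 0).getD [] = table.headD [] := by
    cases table with
    | nil => exact absurd rfl hne
    | cons a l => simp [PySem.List.pyGet?_zero_cons]
  have hNpos : 0 < table.length := List.length_pos_iff.mpr hne
  have hinit : pvShape table.length ((PySem.List.pyGet? table 0).getD []).length
      ((PySem.List.pyRange 0 (table.length : Int) 1).map fun _ =>
        (PySem.List.pyRange 0 ((((PySem.List.pyGet? table 0).getD []).length : Nat) : Int) 1).map
          fun _ => ([] : List String)) := by
    constructor
    · simp [PySem.List.length_pyRange_one]
    · intro i hi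
      rw [List.getD_eq_getElem?_getD, List.getElem?_eq_getElem
        (by simpa [PySem.List.length_pyRange_one] using hi)]
      simp [PySem.List.length_pyRange_one]
  have hinitget : ∀ (i j : Nat),
      pvGet2 ((PySem.List.pyRange 0 (table.length : Int) 1).map fun _ =>
        (PySem.List.pyRange 0 ((((PySem.List.pyGet? table 0).getD []).length : Nat) : Int) 1).map
          fun _ => ([] : List String)) i j = [] := by
    intro i j
    simp only [pvGet2, List.getD, List.getElem?_map]
    cases hx : (PySem.List.pyRange 0 (table.length : Int) 1)[i]? <;>
      simp [List.getElem?_map] <;>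
      cases hy : (PySem.List.pyRange 0
        ((((PySem.List.pyGet? table 0).getD []).length : Nat) : Int) 1)[j]? <;> simp
  have hBshape : pvShape table.length ((PySem.List.pyGet? table 0).getD []).length
      (next_table_alt table) := by
    simp only [next_table_alt]
    exact pvFoldl_shape _ _ _ _
      (fun g duv hg => pvLoopI_shape table _ _ duv hg) _ hinit
  have hBget : ∀ (i j : Nat), i < table.length →
      j < ((PySem.List.pyGet? table 0).getD []).length →
      pvGet2 (next_table_alt table) i j =
      pvDirs.flatMap (fun duv => if duv.1 ∈ pvCellAt table
        (PySem.Int.mod ((i : Int) - duv.2.1) (table.length : Int))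
        (PySem.Int.mod ((j : Int) - duv.2.2) ((((PySem.List.pyGet? table 0).getD []).length : Nat) : Int))
        then [duv.1] else []) := by
    intro i j hi hj
    have key := pvFoldl_effect pvDirs
      (fun res duv => pvLoopI table (table.length : Int)
        ((((PySem.List.pyGet? table 0).getD []).length : Nat) : Int) duv res)
      (fun duv => if duv.1 ∈ pvCellAt table
        (PySem.Int.mod ((i : Int) - duv.2.1) (table.length : Int))
        (PySem.Int.mod ((j : Int) - duv.2.2) ((((PySem.List.pyGet? table 0).getD []).length : Nat) : Int))
        then [duv.1] else [])
      table.length ((PySem.List.pyGet? table 0).getD []).length i j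
      (fun g duv _ hg => by
        simpa using pvLoopI_effect table table.length ((PySem.List.pyGet? table 0).getD []).length
          duv hNpos (by omega) i j hi hj g hg) _ hinit
    obtain ⟨_, hget⟩ := key
    simp only [next_table_alt]
    rw [hget, hinitget i j]
    simp
  have hAlen : (next_table table).length = table.length := by
    simp [next_table, PySem.List.length_pyRange_one]
  have hArowlen : ∀ (i : Nat) (h : i < (next_table table).length),
      (next_table table)[i].length = ((PySem.List.pyGet? table 0).getD []).length := by
    intro i h
    have hi : i < table.length := by rwa [hAlen] at h
    simp [next_table, List.getElem_map, PySem.List.length_pyRange_one]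
  have hAcell : ∀ (i j : Nat) (h1 : i < (next_table table).length)
      (h2 : j < (next_table table)[i].length),
      (next_table table)[i][j] = pvDirs.filterMap (fun duv => if duv.1 ∈ pvCellAt table
        (PySem.Int.mod ((i : Int) - duv.2.1) (table.length : Int))
        (PySem.Int.mod ((j : Int) - duv.2.2) ((((PySem.List.pyGet? table 0).getD []).length : Nat) : Int))
        then some duv.1 else none) := by
    intro i j h1 h2
    simp only [next_table, pvCellAt, List.getElem_map, PySem.List.getElem_pyRange_one, zero_add]
    rfl
  have hBlen : (next_table_alt table).length = table.length := hBshape.1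
  have hBrowlen : ∀ (i : Nat) (h : i < (next_table_alt table).length),
      (next_table_alt table)[i].length = ((PySem.List.pyGet? table 0).getD []).length := by
    intro i h
    have h' := hBshape.2 i (by rwa [hBlen] at h)
    rw [List.getD_eq_getElem?_getD, List.getElem?_eq_getElem h] at h'
    simpa using h'
  apply List.ext_getElem
  · rw [hAlen, hBlen]
  · intro i h1 h2
    have hiN : i < table.length := by rwa [hBlen] at h2
    apply List.ext_getElem
    · rw [hArowlen i h1, hBrowlen i h2]
    · intro j hj1 hj2
      have hjM : j < ((PySem.List.pyGet? table 0).getD []).length := by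
        rwa [hBrowlen i h2] at hj2
      have hB2 : (next_table_alt table)[i][j] = pvGet2 (next_table_alt table) i j := by
        have houter : (next_table_alt table).getD i [] = (next_table_alt table)[i] := by
          rw [List.getD_eq_getElem?_getD, List.getElem?_eq_getElem h2]
          simp
        simp only [pvGet2, houter]
        rw [List.getD_eq_getElem?_getD, List.getElem?_eq_getElem hj2]
        simp
      rw [hB2, hBget i j hiN hjM, hAcell i j h1 hj1]
      exact pvFilterMap_eq_flatMap pvDirs _
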